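-- pv_equiv track=rewrite | github.com/ktmihs/CodingTest | programmers/Kakao/2019 인턴/[Lv1] 크레인 인형뽑기 게임.py | solution
-- ===== SOURCE A (Python) =====
-- def solution(board, moves):
--     answer, stack = 0, []
--     board = [list(b) for b in zip(*board[::-1])]
--     for i in moves:
--         while board[i-1]:
--             if board[i-1][-1] > 0:
--                 stack.append(board[i-1].pop())
--                 break
--             else: del board[i-1][-1]
--         if len(stack) > 1 and stack[-1]==stack[-2]:
--             del stack[-2:]
--             answer+=2
--     return answer
-- ===== SOURCE B (Python) =====
-- def solution(board, moves):
--     answer = 0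
--     stack = []
--     rows = len(board)
--     tops = [0] * (len(board[0]) if board else 0)
--     for m in moves:
--         col = m - 1
--         r = tops[col]
--         while r < rows and board[r][col] <= 0:
--             r += 1
--         tops[col] = r
--         if r < rows:
--             tops[col] = r + 1
--             stack.append(board[r][col])
--             if len(stack) > 1 and stack[-1] == stack[-2]:
--                 del stack[-2:]
--                 answer += 2
--     return answer
-- ===== Notes on version B (the rewrite author's own statement) =====
-- stated objective: alternative
-- what changed: B drops A's build-and-mutate of a transposed column-stack board: it keeps one row-pointer per column into the untouched input grid, advancing the pointer past empty cells and reading dolls directly via board[row][col]; the basket logic is unchanged.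
-- outside the precondition, e.g. on solution([[1, 2], [1]], [0, 0]): A returns 2, B returns 0
import Mathlib
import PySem

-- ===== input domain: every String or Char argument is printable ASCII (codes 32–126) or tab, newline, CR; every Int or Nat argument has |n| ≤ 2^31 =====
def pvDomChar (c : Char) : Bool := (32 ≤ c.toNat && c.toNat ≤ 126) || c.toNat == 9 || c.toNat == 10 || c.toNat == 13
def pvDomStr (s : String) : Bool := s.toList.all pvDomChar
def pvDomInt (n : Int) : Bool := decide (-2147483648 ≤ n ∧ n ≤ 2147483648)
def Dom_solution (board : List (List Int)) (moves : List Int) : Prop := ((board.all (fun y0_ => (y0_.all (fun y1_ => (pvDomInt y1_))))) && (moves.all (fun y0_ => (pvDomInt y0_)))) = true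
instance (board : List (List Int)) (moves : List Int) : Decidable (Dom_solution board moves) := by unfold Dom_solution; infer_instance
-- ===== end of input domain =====

-- B replaces A's transpose-and-mutate simulation by read-only per-column row pointers into the original grid (objective: alternative/idiomatic; return value only — neither implementation mutates the caller's arguments).

-- ===== PORT A =====
-- min row length: zip(*rows) truncates every column at the shortest row
def minLenA (rows : List (List Int)) : Nat :=
  match rows with
  | [] => 0
  | r :: rs => rs.foldr (fun row acc => Nat.min row.length acc) r.length

-- port of [list(b) for b in zip(*rows)] : column j (j < shortest row length) collects row[j] over the rows, exact by zip's truncation rule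
def colsOf (rows : List (List Int)) : List (List Int) :=
  (List.range (minLenA rows)).map (fun j => rows.map (fun row => row.getD j 0))

-- the 'while board[i-1]: …' loop: delete non-positive entries from the end, pop the first positive one
def popTopA (col : List Int) : List Int × Option Int :=
  match h : col.getLast? with
  | none => (col, none)
  | some x =>
    if 0 < x then (col.dropLast, some x) else popTopA col.dropLast
termination_by col.length
decreasing_by
  have hne : col ≠ [] := by intro e; subst e; simp at h
  have : 0 < col.length := List.length_pos_iff.mpr hne
  simp [List.length_dropLast]; omega

-- if len(stack) > 1 and stack[-1] == stack[-2]: del stack[-2:]; answer += 2   (stack stored top-first)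
def basketA (ans : Int) (stack : List Int) : Int × List Int :=
  match stack with
  | a :: b :: rest => if a = b then (ans + 2, rest) else (ans, a :: b :: rest)
  | s => (ans, s)

def stepA (st : Int × List Int × List (List Int)) (m : Int) : Int × List Int × List (List Int) :=
  let ans := st.1
  let stack := st.2.1
  let cols := st.2.2
  let pr := popTopA ((PySem.List.pyGet? cols (m - 1)).getD [])
  let cols' := PySem.List.pySetD cols (m - 1) pr.1
  let stack1 := match pr.2 with | none => stack | some x => x :: stack
  let b := basketA ans stack1
  (b.1, b.2, cols')

def solution (board : List (List Int)) (moves : List Int) : Int :=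
  (moves.foldl stepA (0, [], colsOf board.reverse)).1

-- ===== PORT B =====
-- while r < rows and board[r][col] <= 0: r += 1
def advanceB (board : List (List Int)) (rows : Nat) (col : Int) (r : Nat) : Nat :=
  if h : r < rows then
    if PySem.List.pyGetD (PySem.List.pyGetD board (r : Int) []) col 0 ≤ 0 then
      advanceB board rows col (r + 1)
    else r
  else r
termination_by rows - r

-- if len(stack) > 1 and stack[-1] == stack[-2]: del stack[-2:]; answer += 2   (stack stored top-first)
def basketB (ans : Int) (stack : List Int) : Int × List Int :=
  match stack with
  | a :: b :: rest => if a = b then (ans + 2, rest) else (ans, a :: b :: rest)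
  | s => (ans, s)

def stepB (board : List (List Int)) (rows : Nat) (st : Int × List Int × List Nat) (m : Int) :
    Int × List Int × List Nat :=
  let ans := st.1
  let stack := st.2.1
  let tops := st.2.2
  let col := m - 1
  let r := advanceB board rows col (PySem.List.pyGetD tops col 0)
  if r < rows then
    let b := basketB ans (PySem.List.pyGetD (PySem.List.pyGetD board (r : Int) []) col 0 :: stack)
    (b.1, b.2, PySem.List.pySetD tops col (r + 1))
  else (ans, stack, PySem.List.pySetD tops col r)

def solution_alt (board : List (List Int)) (moves : List Int) : Int :=
  let tops : List Nat := List.replicate (match board with | [] => 0 | r :: _ => r.length) 0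
  (moves.foldl (stepB board board.length) (0, [], tops)).1

-- ===== PRECONDITION & SPEC =====
-- Pre_ excludes moves outside Python range -C..C of A's C columns (min row length; A raises IndexError there, also for any
-- move on an empty board), and non-positive moves on boards with unequal row lengths: there the column picked by Python's
-- negative-index wraparound is an accident of A's truncating transpose (B wraps per row and can reach different cells).
def Pre_solution (board : List (List Int)) (moves : List Int) : Prop :=
  (moves = [] ∨ board ≠ []) ∧ ∀ m ∈ moves,
    (1 ≤ m ∧ ∀ row ∈ board, m ≤ (row.length : Int)) ∨
    (m ≤ 0 ∧ ∀ row ∈ board, 1 - m ≤ (row.length : Int) ∧ (row.length : Int) = ((board.headD []).length : Int))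
instance (board : List (List Int)) (moves : List Int) : Decidable (Pre_solution board moves) := by
  unfold Pre_solution; infer_instance

def pvWitness_solution : List (List Int) × List Int := ([[0, 3], [2, 5]], [1, 2, 2, 1])

def Spec_solution (board : List (List Int)) (moves : List Int) (out : Int) : Prop := out = solution_alt board moves
instance (board : List (List Int)) (moves : List Int) (out : Int) : Decidable (Spec_solution board moves out) := by unfold Spec_solution; infer_instance

-- ===== CLAIM (what is proved, stated in full; the proofs are below) =====
def Claim_equal_solution : Prop := ∀ (board : List (List Int)) (moves : List Int), Dom_solution board moves → Pre_solution board moves → Spec_solution board moves (solution board moves)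

-- ===== LEMMAS AND PROOFS =====

theorem pvGetD_set_self {α} (l : List α) (i : Nat) (v d : α) (h : i < l.length) :
    (l.set i v).getD i d = v := by
  simp [List.getD, h]

theorem pvGetD_set_ne {α} (l : List α) (i j : Nat) (v d : α) (h : j ≠ i) :
    (l.set i v).getD j d = l.getD j d := by
  simp [List.getD, Ne.symm h]

theorem pvGetD_replicate_zero (n j : Nat) : (List.replicate n (0 : Nat)).getD j 0 = 0 := by
  simp [List.getD]

theorem pvFoldrMin_le (rs : List (List Int)) (init k : Nat) :
    k ≤ rs.foldr (fun row acc => Nat.min row.length acc) init ↔ k ≤ init ∧ ∀ r ∈ rs, k ≤ r.length := by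
  induction rs with
  | nil => simp
  | cons a rs ih => simp [ih]; tauto

theorem pvMinLenA_lt (rows : List (List Int)) (j : Nat) (h : j < minLenA rows) :
    ∀ r ∈ rows, j < r.length := by
  cases rows with
  | nil => simp [minLenA] at h
  | cons a rs =>
    have := (pvFoldrMin_le rs a.length (j+1)).mp (by simpa [minLenA] using h)
    intro r hr
    simp only [List.mem_cons] at hr
    rcases hr with rfl | hr
    · omega
    · exact this.2 _ hr

theorem pvLe_minLenA (rows : List (List Int)) (k : Nat) (hne : rows ≠ [])
    (h : ∀ r ∈ rows, k ≤ r.length) : k ≤ minLenA rows := by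
  cases rows with
  | nil => exact absurd rfl hne
  | cons a rs =>
    simp only [minLenA]
    exact (pvFoldrMin_le rs a.length k).mpr ⟨h a (by simp), fun r hr => h r (by simp [hr])⟩

-- the column of j, bottom row first (as A stores it)
def colF (board : List (List Int)) (j : Nat) : List Int :=
  board.reverse.map (fun row => row.getD j 0)

theorem pvColF_length (board : List (List Int)) (j : Nat) : (colF board j).length = board.length := by
  simp [colF]

theorem pvColF_take_getLast (board : List (List Int)) (j t : Nat) (ht : t < board.length) :
    ((colF board j).take (board.length - t)).getLast? = some ((board.getD t []).getD j 0) := by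
  rw [List.getLast?_eq_getElem?]
  have hlen : ((colF board j).take (board.length - t)).length = board.length - t := by
    simp [pvColF_length]
  rw [hlen, List.getElem?_take_of_lt (by omega)]
  have hidx : board.length - t - 1 < (colF board j).length := by simp [pvColF_length]; omega
  rw [List.getElem?_eq_getElem hidx]
  simp only [colF]
  rw [List.getElem_map]
  have hrev : board.reverse[board.length - t - 1]'(by simp [pvColF_length] at hidx ⊢; omega) = board[t]'ht := by
    rw [List.getElem_reverse]
    congr 1
    omega
  rw [hrev, List.getD_eq_getElem _ _ ht]

theorem pvColF_take_dropLast (board : List (List Int)) (j t : Nat) :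
    ((colF board j).take (board.length - t)).dropLast = (colF board j).take (board.length - (t+1)) := by
  rw [List.dropLast_eq_take, List.take_take]
  congr 1
  simp [List.length_take, pvColF_length]
  omega

theorem pvPopAdv (board : List (List Int)) (j : Nat) :
    ∀ n t, t ≤ board.length → board.length - t = n →
    advanceB board board.length (j : Int) t ≤ board.length ∧
    popTopA ((colF board j).take (board.length - t)) =
      (if advanceB board board.length (j : Int) t < board.length then
        ((colF board j).take (board.length - (advanceB board board.length (j : Int) t + 1)),
         some ((board.getD (advanceB board board.length (j : Int) t) []).getD j 0))
      else ([], none)) := by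
  intro n
  induction n with
  | zero =>
    intro t ht hn
    have hte : t = board.length := by omega
    subst hte
    rw [advanceB]
    simp only [lt_irrefl, dite_false, if_false]
    refine ⟨le_refl _, ?_⟩
    rw [Nat.sub_self, List.take_zero, popTopA]
    simp
  | succ n ih =>
    intro t ht hn
    have htlt : t < board.length := by omega
    have hcell : PySem.List.pyGetD (PySem.List.pyGetD board ((t : Nat) : Int) []) ((j : Nat) : Int) 0
        = (board.getD t []).getD j 0 := by
      simp [PySem.List.pyGetD_natCast]
    rw [advanceB, dif_pos htlt, hcell]
    by_cases hc : (board.getD t []).getD j 0 ≤ 0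
    · rw [if_pos hc]
      have hrec := ih (t + 1) (by omega) (by omega)
      refine ⟨hrec.1, ?_⟩
      rw [popTopA]
      split
      · next heq =>
        rw [pvColF_take_getLast board j t htlt] at heq
        exact absurd heq (by simp)
      · next x heq =>
        rw [pvColF_take_getLast board j t htlt] at heq
        injection heq with hx
        subst hx
        rw [if_neg (by omega), pvColF_take_dropLast]
        exact hrec.2
    · rw [if_neg hc, if_pos htlt]
      refine ⟨by omega, ?_⟩
      rw [popTopA]
      split
      · next heq =>
        rw [pvColF_take_getLast board j t htlt] at heq
        exact absurd heq (by simp)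
      · next x heq =>
        rw [pvColF_take_getLast board j t htlt] at heq
        injection heq with hx
        subst hx
        rw [if_pos (by omega), pvColF_take_dropLast]

theorem pvBasketAB (ans : Int) (s : List Int) : basketA ans s = basketB ans s := by
  cases s with
  | nil => rfl
  | cons a t => cases t <;> rfl

theorem pvBasket_noop (ans : Int) (s : List Int) (h : List.IsChain (· ≠ ·) s) :
    basketA ans s = (ans, s) := by
  cases s with
  | nil => rfl
  | cons a t =>
    cases t with
    | nil => rfl
    | cons b rest =>
      have hab : a ≠ b := (List.isChain_cons_cons.mp h).1
      simp [basketA, hab]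

theorem pvBasket_chain (ans x : Int) (s : List Int) (h : List.IsChain (· ≠ ·) s) :
    List.IsChain (· ≠ ·) (basketA ans (x :: s)).2 := by
  cases s with
  | nil => exact List.isChain_singleton ..
  | cons b rest =>
    by_cases hxb : x = b
    · simp only [basketA, if_pos hxb]
      exact h.of_cons
    · simp only [basketA, if_neg hxb]
      exact List.IsChain.cons_cons hxb h

theorem pvPySetD_neg {α : Type} (xs : List α) (k : Nat) (v : α) (h1 : 0 < k) (h2 : k ≤ xs.length) :
    PySem.List.pySetD xs (-(k : Int)) v = xs.set (xs.length - k) v := by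
  simp [PySem.List.pySetD, PySem.List.pySet?, PySem.List.pyIdx?, h2, Nat.pos_iff_ne_zero.mp h1]

theorem pvAdvanceB_congr (board : List (List Int)) (c1 c2 : Int)
    (h : ∀ r', r' < board.length →
      PySem.List.pyGetD (PySem.List.pyGetD board ((r' : Nat) : Int) []) c1 0 =
      PySem.List.pyGetD (PySem.List.pyGetD board ((r' : Nat) : Int) []) c2 0) :
    ∀ n t, board.length - t = n →
      advanceB board board.length c1 t = advanceB board board.length c2 t := by
  intro n
  induction n with
  | zero =>
    intro t hn
    have ht : ¬ t < board.length := by omega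
    conv_lhs => rw [advanceB]
    conv_rhs => rw [advanceB]
    rw [dif_neg ht, dif_neg ht]
  | succ n ih =>
    intro t hn
    have ht : t < board.length := by omega
    conv_lhs => rw [advanceB]
    conv_rhs => rw [advanceB]
    rw [dif_pos ht, dif_pos ht, h t ht]
    by_cases hc : PySem.List.pyGetD (PySem.List.pyGetD board ((t : Nat) : Int) []) c2 0 ≤ 0
    · rw [if_pos hc, if_pos hc]
      exact ih (t + 1) (by omega)
    · rw [if_neg hc, if_neg hc]

-- the per-move admissibility Pre_ provides (translated to the minimum column count)
def pvMoveOK (board : List (List Int)) (m : Int) : Prop :=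
  (1 ≤ m ∧ m ≤ (minLenA board.reverse : Int)) ∨
  (m ≤ 0 ∧ 1 - m ≤ (minLenA board.reverse : Int) ∧ ∀ row ∈ board, row.length = (board.headD []).length)

-- a single column index j < C behind Python's (possibly negative) index m-1, for every access both ports make
theorem pvIdxFacts (board : List (List Int)) (cols : List (List Int)) (tops : List Nat) (m : Int)
    (hb : board ≠ []) (h1 : cols.length = minLenA board.reverse)
    (h2 : tops.length = (board.headD []).length)
    (hCW : minLenA board.reverse ≤ tops.length)
    (hm : pvMoveOK board m) :
    ∃ j, j < minLenA board.reverse ∧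
      (PySem.List.pyGet? cols (m - 1)).getD [] = cols.getD j [] ∧
      (∀ v, PySem.List.pySetD cols (m - 1) v = cols.set j v) ∧
      PySem.List.pyGetD tops (m - 1) 0 = tops.getD j 0 ∧
      (∀ v : Nat, PySem.List.pySetD tops (m - 1) v = tops.set j v) ∧
      (∀ t', advanceB board board.length (m - 1) t' = advanceB board board.length ((j : Nat) : Int) t') ∧
      (∀ r', r' < board.length →
        PySem.List.pyGetD (PySem.List.pyGetD board ((r' : Nat) : Int) []) (m - 1) 0 =
          (board.getD r' []).getD j 0) := by
  rcases hm with ⟨hm1, hmC⟩ | ⟨hm0, hmk, hrect⟩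
  · -- 1 ≤ m ≤ C : the plain non-negative index j = m-1
    have hmj : m - 1 = (((m - 1).toNat : Nat) : Int) := by omega
    refine ⟨(m - 1).toNat, by omega, ?_, ?_, ?_, ?_, ?_, ?_⟩
    · conv_lhs => rw [hmj, PySem.List.pyGet?_natCast]
      rw [List.getD_eq_getElem?_getD]
    · intro v
      conv_lhs => rw [hmj, PySem.List.pySetD_natCast]
    · conv_lhs => rw [hmj, PySem.List.pyGetD_natCast]
    · intro v
      conv_lhs => rw [hmj, PySem.List.pySetD_natCast]
    · intro t'
      conv_lhs => rw [hmj]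
    · intro r' _
      conv_lhs => rw [hmj]
      simp [PySem.List.pyGetD_natCast]
  · -- m ≤ 0 with equal row lengths: wraparound index j = C - (1-m)
    have hkInt : (((1 - m).toNat : Nat) : Int) = 1 - m := Int.toNat_of_nonneg (by omega)
    have hk0 : 0 < (1 - m).toNat := by omega
    have hkC : (1 - m).toNat ≤ minLenA board.reverse := by omega
    have hm1k : m - 1 = -(((1 - m).toNat : Nat) : Int) := by omega
    -- all row lengths equal the head's, and C equals that common width
    have hWC : (board.headD []).length ≤ minLenA board.reverse := by
      apply pvLe_minLenA _ _ (by simpa using hb)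
      intro r hr
      rw [hrect r (List.mem_reverse.mp hr)]
    have hCW' : minLenA board.reverse = (board.headD []).length := by omega
    have hrowlen : ∀ r', r' < board.length → (board.getD r' []).length = minLenA board.reverse := by
      intro r' hr'
      rw [List.getD_eq_getElem _ _ hr', hrect _ (List.getElem_mem hr'), hCW']
    have hdoll : ∀ r', r' < board.length →
        PySem.List.pyGetD (PySem.List.pyGetD board ((r' : Nat) : Int) []) (m - 1) 0 =
          (board.getD r' []).getD (minLenA board.reverse - (1 - m).toNat) 0 := by
      intro r' hr'
      rw [hm1k, PySem.List.pyGetD_natCast,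
        PySem.List.pyGetD_neg_natCast _ _ 0 hk0 (by rw [hrowlen r' hr']; exact hkC),
        ← List.getD_eq_getElem _ 0 (by rw [hrowlen r' hr']; omega)]
      congr 1
      rw [hrowlen r' hr']
    refine ⟨minLenA board.reverse - (1 - m).toNat, by omega, ?_, ?_, ?_, ?_, ?_, hdoll⟩
    · rw [hm1k, PySem.List.pyGet?_neg_natCast cols _ hk0 (by omega), List.getD_eq_getElem?_getD]
      congr 2
      omega
    · intro v
      rw [hm1k, pvPySetD_neg cols _ v hk0 (by omega)]
      congr 1
      omega
    · rw [hm1k, PySem.List.pyGetD_neg_natCast tops _ 0 hk0 (by omega),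
        ← List.getD_eq_getElem _ 0 (by omega)]
      congr 1
      omega
    · intro v
      rw [hm1k, pvPySetD_neg tops _ v hk0 (by omega)]
      congr 1
      omega
    · intro t'
      apply pvAdvanceB_congr board (m - 1)
        (((minLenA board.reverse - (1 - m).toNat : Nat) : Int)) _ (board.length - t') t' rfl
      intro r' hr'
      rw [hdoll r' hr', PySem.List.pyGetD_natCast, PySem.List.pyGetD_natCast]

def pvInv (board : List (List Int)) (cols : List (List Int)) (tops : List Nat) : Prop :=
  cols.length = minLenA board.reverse ∧ tops.length = (board.headD []).length ∧
  minLenA board.reverse ≤ tops.length ∧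
  ∀ j, j < minLenA board.reverse →
    tops.getD j 0 ≤ board.length ∧
    cols.getD j [] = (colF board j).take (board.length - tops.getD j 0)

theorem pvFoldEq (board : List (List Int)) (hb : board ≠ []) :
    ∀ (ms : List Int), (∀ m ∈ ms, pvMoveOK board m) →
    ∀ (ans : Int) (stack : List Int) cols tops, pvInv board cols tops →
    List.IsChain (· ≠ ·) stack →
    (ms.foldl stepA (ans, stack, cols)).1 = (ms.foldl (stepB board board.length) (ans, stack, tops)).1 := by
  intro ms
  induction ms with
  | nil => intro _ ans stack cols tops _ _; rfl
  | cons m ms ih =>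
    intro hm ans stack cols tops hinv hch
    have hmrest : ∀ x ∈ ms, pvMoveOK board x := fun x hx => hm x (List.mem_cons_of_mem _ hx)
    obtain ⟨hlen, hWlen, hWC, hinv3⟩ := hinv
    obtain ⟨j, hjC, hAget, hAset, hBget, hBset, hAdv, hDoll⟩ :=
      pvIdxFacts board cols tops m hb hlen hWlen hWC (hm m (List.mem_cons_self ..))
    obtain ⟨htR, hcol⟩ := hinv3 j hjC
    set t := tops.getD j 0 with htdef
    obtain ⟨hrR, hpop⟩ := pvPopAdv board j (board.length - t) t htR rfl
    set r := advanceB board board.length ((j : Nat) : Int) t with hrdef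
    simp only [List.foldl_cons]
    by_cases hr : r < board.length
    · -- a doll is taken: both sides push the same doll and update column j
      have hstepA : stepA (ans, stack, cols) m =
          ((basketA ans (((board.getD r []).getD j 0) :: stack)).1,
           (basketA ans (((board.getD r []).getD j 0) :: stack)).2,
           cols.set j ((colF board j).take (board.length - (r + 1)))) := by
        simp only [stepA, hAget, hcol, hpop, if_pos hr, hAset]
      have hstepB : stepB board board.length (ans, stack, tops) m =
          ((basketA ans (((board.getD r []).getD j 0) :: stack)).1,
           (basketA ans (((board.getD r []).getD j 0) :: stack)).2,
           tops.set j (r + 1)) := by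
        simp only [stepB, hBget, hAdv, ← hrdef, if_pos hr, hBset, hDoll r hr, ← pvBasketAB]
      rw [hstepA, hstepB]
      apply ih hmrest
      · refine ⟨by simpa using hlen, by simpa using hWlen, by simpa using hWC, ?_⟩
        intro j' hj'
        by_cases hjj : j' = j
        · subst hjj
          rw [pvGetD_set_self _ _ _ _ (by omega), pvGetD_set_self _ _ _ _ (by omega)]
          exact ⟨by omega, rfl⟩
        · rw [pvGetD_set_ne _ _ _ _ _ hjj, pvGetD_set_ne _ _ _ _ _ hjj]
          exact hinv3 j' hj'
      · exact pvBasket_chain ans _ stack hch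
    · -- column exhausted: nothing is pushed, the basket check cannot fire
      have hreq : r = board.length := by omega
      have hstepA : stepA (ans, stack, cols) m = (ans, stack, cols.set j []) := by
        simp only [stepA, hAget, hcol, hpop, if_neg hr, hAset]
        rw [pvBasket_noop ans stack hch]
      have hstepB : stepB board board.length (ans, stack, tops) m = (ans, stack, tops.set j r) := by
        simp only [stepB, hBget, hAdv, ← hrdef, if_neg hr, hBset]
      rw [hstepA, hstepB]
      apply ih hmrest _ _ _ _ _ hch
      refine ⟨by simpa using hlen, by simpa using hWlen, by simpa using hWC, ?_⟩
      intro j' hj'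
      by_cases hjj : j' = j
      · subst hjj
        rw [pvGetD_set_self _ _ _ _ (by omega), pvGetD_set_self _ _ _ _ (by omega)]
        exact ⟨by omega, by simp [hreq]⟩
      · rw [pvGetD_set_ne _ _ _ _ _ hjj, pvGetD_set_ne _ _ _ _ _ hjj]
        exact hinv3 j' hj'

-- ===== VERDICT (by name: the statement is the Claim_ definition above) =====
theorem solution_spec : Claim_equal_solution := by
  intro board moves _ hpre
  unfold Spec_solution
  obtain ⟨hbm, hmv⟩ := hpre
  cases board with
  | nil =>
    have hmnil : moves = [] := by rcases hbm with h | h; exact h; exact absurd rfl h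
    subst hmnil
    rfl
  | cons r0 rs =>
    have hCr : ∀ rr ∈ (r0 :: rs).reverse, minLenA (r0 :: rs).reverse ≤ rr.length := by
      intro rr hrr
      rcases Nat.eq_zero_or_pos (minLenA (r0 :: rs).reverse) with h | h
      · omega
      · have := pvMinLenA_lt _ (minLenA (r0 :: rs).reverse - 1) (by omega) rr hrr
        omega
    have hms : ∀ m ∈ moves, pvMoveOK (r0 :: rs) m := by
      intro m hm
      rcases hmv m hm with ⟨h1, h2⟩ | ⟨h0, h2⟩
      · left
        refine ⟨h1, ?_⟩
        have hk : m.toNat ≤ minLenA (r0 :: rs).reverse := by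
          apply pvLe_minLenA _ _ (by simp)
          intro rr hrr
          have := h2 rr (List.mem_reverse.mp hrr)
          omega
        omega
      · right
        refine ⟨h0, ?_, ?_⟩
        · have hk : (1 - m).toNat ≤ minLenA (r0 :: rs).reverse := by
            apply pvLe_minLenA _ _ (by simp)
            intro rr hrr
            have := (h2 rr (List.mem_reverse.mp hrr)).1
            omega
          omega
        · intro row hrow
          have := (h2 row hrow).2
          simp only [List.headD_cons] at this ⊢
          omega
    simp only [solution, solution_alt]
    apply pvFoldEq _ (by simp) _ hms
    · refine ⟨by simp [colsOf], by simp, ?_, ?_⟩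
      · have := hCr r0 (List.mem_reverse.mpr (by simp))
        simpa using this
      · intro j hj
        rw [pvGetD_replicate_zero]
        refine ⟨by omega, ?_⟩
        have hgc : (colsOf (r0 :: rs).reverse).getD j [] = colF (r0 :: rs) j := by
          rw [List.getD_eq_getElem _ _ (by simpa [colsOf] using hj)]
          simp only [colsOf]
          rw [List.getElem_map]
          simp [colF, List.getElem_range]
        rw [hgc, Nat.sub_zero, ← pvColF_length (r0 :: rs) j, List.take_length]
    · simp
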